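-- pv_equiv track=rewrite | github.com/dsjads/PULP | consistent_testing_manager/FPMatricsCaculation.py | organize_features
-- ===== SOURCE A (Python) =====
-- def organize_features(attribute_data):
--     FEATURE_TYPE_ORDER = [
--         "bscp",
--         "bug_involving_statements",
--         "code_coverage",
--         "correctness_reflectability",
--         "incorrectness_verifiability"
--     ]
--
--     reorganized_data = {}
--     for model_name, raw_features in attribute_data.items():
--         label = raw_features.get("LABEL")
--         reorganized_features = {"LABEL": label} if label is not None else {}
--
--         for feature_type in FEATURE_TYPE_ORDER:
--             type_keys = [key for key in raw_features.keys() if key.startswith(f"{feature_type}_")]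
--
--             sorted_type_keys = sorted(
--                 type_keys,
--                 key=lambda x: int(x.rsplit("_", 1)[1])
--             )
--
--             for key in sorted_type_keys:
--                 reorganized_features[key] = raw_features[key]
--
--         reorganized_data[model_name] = reorganized_features
--
--     return reorganized_data
-- ===== SOURCE B (Python) =====
-- def organize_features(attribute_data):
--     FEATURE_TYPE_ORDER = [
--         "bscp",
--         "bug_involving_statements",
--         "code_coverage",
--         "correctness_reflectability",
--         "incorrectness_verifiability"
--     ]
--     prefixes = [ft + "_" for ft in FEATURE_TYPE_ORDER]
--
--     reorganized_data = {}
--     for model_name, raw_features in attribute_data.items():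
--         # one pass over the keys: drop each key into the bucket of its prefix
--         buckets = [[], [], [], [], []]
--         for key in raw_features:
--             for i, prefix in enumerate(prefixes):
--                 if key.startswith(prefix):
--                     buckets[i].append(key)
--                     break
--
--         reorganized_features = {}
--         label = raw_features.get("LABEL")
--         if label is not None:
--             reorganized_features["LABEL"] = label
--         for bucket in buckets:
--             for key in sorted(bucket, key=lambda x: int(x.rsplit("_", 1)[1])):
--                 reorganized_features[key] = raw_features[key]
--         reorganized_data[model_name] = reorganized_features
--     return reorganized_data
-- ===== Notes on version B (the rewrite author's own statement) =====
-- stated objective: alternative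
-- what changed: B replaces A's five full scans of the key list (one filter pass per feature type) by a single grouping pass that drops each key into the bucket of its unique matching prefix, then emits LABEL plus the five sorted buckets.
import Mathlib
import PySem

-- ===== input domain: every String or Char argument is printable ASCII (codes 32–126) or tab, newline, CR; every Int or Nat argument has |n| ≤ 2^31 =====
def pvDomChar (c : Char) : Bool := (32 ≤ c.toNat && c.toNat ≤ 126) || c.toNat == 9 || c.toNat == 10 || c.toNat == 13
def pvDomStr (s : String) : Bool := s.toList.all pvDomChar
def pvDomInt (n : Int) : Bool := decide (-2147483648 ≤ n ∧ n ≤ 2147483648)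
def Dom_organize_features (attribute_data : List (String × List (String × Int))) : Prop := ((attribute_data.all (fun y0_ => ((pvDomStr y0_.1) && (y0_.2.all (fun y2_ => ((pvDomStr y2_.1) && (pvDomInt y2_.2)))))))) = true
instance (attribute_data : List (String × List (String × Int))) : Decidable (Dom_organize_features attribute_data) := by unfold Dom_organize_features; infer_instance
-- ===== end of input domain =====

-- B replaces A's five full scans of each model's key list by ONE grouping pass into five prefix buckets;
-- return values proved equal (dicts as insertion-ordered association lists).

-- x.rsplit("_", 1)[1]: the characters after the LAST '_' — exact whenever '_' occurs in s,
-- which holds for every key both programs apply it to (the key starts with "<feature_type>_").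
def pvLastField (s : String) : String :=
  String.ofList ((s.toList.reverse.takeWhile (fun c => c ≠ '_')).reverse)

-- int(x.rsplit("_", 1)[1]) as a sort key; exact under Pre_ (the parse succeeds there).
def pvSortKey (k : String) : Int := (PySem.Int.ofStr? (pvLastField k)).getD 0

-- ===== PORT A =====
def organize_features (attribute_data : List (String × List (String × Int))) : List (String × List (String × Int)) :=
  let FEATURE_TYPE_ORDER : List String :=
    ["bscp", "bug_involving_statements", "code_coverage", "correctness_reflectability", "incorrectness_verifiability"]
  ((PySem.Dict.ofList attribute_data).items.foldl
    (fun (acc : PySem.Dict String (List (String × Int))) mp =>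
      let raw : PySem.Dict String Int := PySem.Dict.ofList mp.2
      let reorganized0 : PySem.Dict String Int :=
        match raw.get? "LABEL" with
        | some v => PySem.Dict.insert PySem.Dict.empty "LABEL" v
        | none => PySem.Dict.empty
      let reorganized := FEATURE_TYPE_ORDER.foldl
        (fun d featureType =>
          let typeKeys := raw.keys.filter (fun k => PySem.Str.startswith k (featureType ++ "_"))
          let sortedTypeKeys := PySem.List.sorted typeKeys pvSortKey
          -- raw_features[key]: key ∈ raw.keys here, so the lookup cannot fail; getD is exact
          sortedTypeKeys.foldl (fun d k => d.insert k (raw.getD k 0)) d)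
        reorganized0
      acc.insert mp.1 reorganized.items)
    PySem.Dict.empty).items

-- ===== PORT B =====
-- buckets = [[],[],[],[],[]] is the 5-tuple; the inner 'for prefix … break' is the if/elif chain over the five literal prefixes.
def organize_features_alt (attribute_data : List (String × List (String × Int))) : List (String × List (String × Int)) :=
  (PySem.Dict.ofList attribute_data).items.map (fun mp =>
    let raw : PySem.Dict String Int := PySem.Dict.ofList mp.2
    let b := raw.keys.foldl
      (fun (b : List String × List String × List String × List String × List String) k =>
        if PySem.Str.startswith k "bscp_" then (b.1 ++ [k], b.2.1, b.2.2.1, b.2.2.2.1, b.2.2.2.2)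
        else if PySem.Str.startswith k "bug_involving_statements_" then (b.1, b.2.1 ++ [k], b.2.2.1, b.2.2.2.1, b.2.2.2.2)
        else if PySem.Str.startswith k "code_coverage_" then (b.1, b.2.1, b.2.2.1 ++ [k], b.2.2.2.1, b.2.2.2.2)
        else if PySem.Str.startswith k "correctness_reflectability_" then (b.1, b.2.1, b.2.2.1, b.2.2.2.1 ++ [k], b.2.2.2.2)
        else if PySem.Str.startswith k "incorrectness_verifiability_" then (b.1, b.2.1, b.2.2.1, b.2.2.2.1, b.2.2.2.2 ++ [k])
        else b)
      ([], [], [], [], [])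
    let base : List (String × Int) :=
      match raw.get? "LABEL" with
      | some v => [("LABEL", v)]
      | none => []
    (mp.1,
      base
      ++ (PySem.List.sorted b.1 pvSortKey).map (fun k => (k, raw.getD k 0))
      ++ (PySem.List.sorted b.2.1 pvSortKey).map (fun k => (k, raw.getD k 0))
      ++ (PySem.List.sorted b.2.2.1 pvSortKey).map (fun k => (k, raw.getD k 0))
      ++ (PySem.List.sorted b.2.2.2.1 pvSortKey).map (fun k => (k, raw.getD k 0))
      ++ (PySem.List.sorted b.2.2.2.2 pvSortKey).map (fun k => (k, raw.getD k 0))))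

-- ===== PRECONDITION & SPEC =====
-- Pre_ excludes exactly the inputs on which A raises ValueError: a key that starts with one of the
-- five feature-type prefixes but whose part after the last '_' is not int()-parsable.
def Pre_organize_features (attribute_data : List (String × List (String × Int))) : Prop :=
  ∀ p ∈ attribute_data, ∀ q ∈ p.2,
    (["bscp_", "bug_involving_statements_", "code_coverage_", "correctness_reflectability_", "incorrectness_verifiability_"].any
      (fun pre => PySem.Str.startswith q.1 pre)) = true →
    (PySem.Int.ofStr? (pvLastField q.1)).isSome = true
instance (attribute_data : List (String × List (String × Int))) : Decidable (Pre_organize_features attribute_data) := by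
  unfold Pre_organize_features; infer_instance

def pvWitness_organize_features : (List (String × List (String × Int))) :=
  [("model", [("LABEL", 1), ("bscp_2", 5), ("bscp_10", 7), ("code_coverage_0", -3), ("other", 9)])]

def Spec_organize_features (attribute_data : List (String × List (String × Int))) (out : List (String × List (String × Int))) : Prop := out = organize_features_alt attribute_data
instance (attribute_data : List (String × List (String × Int))) (out : List (String × List (String × Int))) : Decidable (Spec_organize_features attribute_data out) := by unfold Spec_organize_features; infer_instance

-- ===== CLAIM (what is proved, stated in full; the proofs are below) =====
def Claim_equal_organize_features : Prop := ∀ (attribute_data : List (String × List (String × Int))), Dom_organize_features attribute_data → Pre_organize_features attribute_data → Spec_organize_features attribute_data (organize_features attribute_data)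

-- ===== LEMMAS AND PROOFS =====

-- if neither of two prefixes is a prefix of the other, no string starts with both
theorem pv_sw_excl (p q s : String) (h2 : ¬ (p.toList <+: q.toList)) (h3 : ¬ (q.toList <+: p.toList))
    (h : PySem.Str.startswith s p = true) : PySem.Str.startswith s q = false := by
  by_contra hq
  rw [Bool.not_eq_false] at hq
  rw [PySem.Str.startswith_eq, PySem.Chars.startswith_iff] at h hq
  rcases List.prefix_or_prefix_of_prefix h hq with hc | hc
  · exact h2 hc
  · exact h3 hc

theorem pv_buckets (ks : List String) (acc : List String × List String × List String × List String × List String) :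
    ks.foldl
      (fun (b : List String × List String × List String × List String × List String) k =>
        if PySem.Str.startswith k "bscp_" then (b.1 ++ [k], b.2.1, b.2.2.1, b.2.2.2.1, b.2.2.2.2)
        else if PySem.Str.startswith k "bug_involving_statements_" then (b.1, b.2.1 ++ [k], b.2.2.1, b.2.2.2.1, b.2.2.2.2)
        else if PySem.Str.startswith k "code_coverage_" then (b.1, b.2.1, b.2.2.1 ++ [k], b.2.2.2.1, b.2.2.2.2)
        else if PySem.Str.startswith k "correctness_reflectability_" then (b.1, b.2.1, b.2.2.1, b.2.2.2.1 ++ [k], b.2.2.2.2)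
        else if PySem.Str.startswith k "incorrectness_verifiability_" then (b.1, b.2.1, b.2.2.1, b.2.2.2.1, b.2.2.2.2 ++ [k])
        else b)
      acc
    = (acc.1 ++ ks.filter (fun k => PySem.Str.startswith k "bscp_"),
       acc.2.1 ++ ks.filter (fun k => PySem.Str.startswith k "bug_involving_statements_"),
       acc.2.2.1 ++ ks.filter (fun k => PySem.Str.startswith k "code_coverage_"),
       acc.2.2.2.1 ++ ks.filter (fun k => PySem.Str.startswith k "correctness_reflectability_"),
       acc.2.2.2.2 ++ ks.filter (fun k => PySem.Str.startswith k "incorrectness_verifiability_")) := by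
  induction ks generalizing acc with
  | nil => simp
  | cons k ks ih =>
    by_cases h1 : PySem.Str.startswith k "bscp_" = true
    · have e2 := pv_sw_excl _ "bug_involving_statements_" _ (by decide) (by decide) h1
      have e3 := pv_sw_excl _ "code_coverage_" _ (by decide) (by decide) h1
      have e4 := pv_sw_excl _ "correctness_reflectability_" _ (by decide) (by decide) h1
      have e5 := pv_sw_excl _ "incorrectness_verifiability_" _ (by decide) (by decide) h1
      simp only [List.foldl_cons, List.filter_cons, h1, e2, e3, e4, e5, Bool.false_eq_true, if_false]
      rw [ih]
      simp
    · rw [Bool.not_eq_true] at h1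
      by_cases h2 : PySem.Str.startswith k "bug_involving_statements_" = true
      · have e3 := pv_sw_excl _ "code_coverage_" _ (by decide) (by decide) h2
        have e4 := pv_sw_excl _ "correctness_reflectability_" _ (by decide) (by decide) h2
        have e5 := pv_sw_excl _ "incorrectness_verifiability_" _ (by decide) (by decide) h2
        simp only [List.foldl_cons, List.filter_cons, h1, h2, e3, e4, e5, Bool.false_eq_true, if_false]
        rw [ih]
        simp
      · rw [Bool.not_eq_true] at h2
        by_cases h3 : PySem.Str.startswith k "code_coverage_" = true
        · have e4 := pv_sw_excl _ "correctness_reflectability_" _ (by decide) (by decide) h3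
          have e5 := pv_sw_excl _ "incorrectness_verifiability_" _ (by decide) (by decide) h3
          simp only [List.foldl_cons, List.filter_cons, h1, h2, h3, e4, e5, Bool.false_eq_true, if_false]
          rw [ih]
          simp
        · rw [Bool.not_eq_true] at h3
          by_cases h4 : PySem.Str.startswith k "correctness_reflectability_" = true
          · have e5 := pv_sw_excl _ "incorrectness_verifiability_" _ (by decide) (by decide) h4
            simp only [List.foldl_cons, List.filter_cons, h1, h2, h3, h4, e5, Bool.false_eq_true, if_false]
            rw [ih]
            simp
          · rw [Bool.not_eq_true] at h4
            by_cases h5 : PySem.Str.startswith k "incorrectness_verifiability_" = true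
            · simp only [List.foldl_cons, List.filter_cons, h1, h2, h3, h4, h5, Bool.false_eq_true, if_false]
              rw [ih]
              simp
            · rw [Bool.not_eq_true] at h5
              simp only [List.foldl_cons, List.filter_cons, h1, h2, h3, h4, h5, Bool.false_eq_true, if_false]
              rw [ih]

theorem pv_foldA (raw : PySem.Dict String Int) (ps : List String) (d : PySem.Dict String Int)
    (hnk : raw.keys.Nodup)
    (hfresh : ∀ p ∈ ps, ∀ k, PySem.Str.startswith k (p ++ "_") = true → d.contains k = false)
    (hexcl : ps.Pairwise (fun p q => ∀ k, PySem.Str.startswith k (q ++ "_") = true → PySem.Str.startswith k (p ++ "_") = false)) :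
    (ps.foldl (fun d featureType =>
        (PySem.List.sorted (raw.keys.filter (fun k => PySem.Str.startswith k (featureType ++ "_"))) pvSortKey).foldl
          (fun d k => d.insert k (raw.getD k 0)) d) d).items
    = d.items ++ ps.flatMap (fun ft =>
        (PySem.List.sorted (raw.keys.filter (fun k => PySem.Str.startswith k (ft ++ "_"))) pvSortKey).map
          (fun k => (k, raw.getD k 0))) := by
  induction ps generalizing d with
  | nil => simp
  | cons p ps ih =>
    have hmemS : ∀ k ∈ PySem.List.sorted (raw.keys.filter (fun k => PySem.Str.startswith k (p ++ "_"))) pvSortKey,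
        PySem.Str.startswith k (p ++ "_") = true := by
      intro k hk
      rw [PySem.List.mem_sorted] at hk
      exact (List.mem_filter.mp hk).2
    have hSnodup : (PySem.List.sorted (raw.keys.filter (fun k => PySem.Str.startswith k (p ++ "_"))) pvSortKey).Nodup :=
      ((PySem.List.sorted_perm _ _ _).nodup_iff).mpr (hnk.filter _)
    have h1 := PySem.Dict.items_foldl_insert_fresh
      (l := PySem.List.sorted (raw.keys.filter (fun k => PySem.Str.startswith k (p ++ "_"))) pvSortKey)
      (k := fun a => a) (v := fun a => raw.getD a 0) (d := d)
      (by intro a ha; exact hfresh p (List.mem_cons_self) a (hmemS a ha))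
      (by simpa using hSnodup)
    have hkeys := PySem.Dict.keys_foldl_insert
      (l := PySem.List.sorted (raw.keys.filter (fun k => PySem.Str.startswith k (p ++ "_"))) pvSortKey)
      (f := fun d a => raw.getD a 0) (d := d)
    have hfresh' : ∀ q ∈ ps, ∀ k, PySem.Str.startswith k (q ++ "_") = true →
        ((PySem.List.sorted (raw.keys.filter (fun k => PySem.Str.startswith k (p ++ "_"))) pvSortKey).foldl
          (fun d k => d.insert k (raw.getD k 0)) d).contains k = false := by
      intro q hq k hswq
      rw [← Bool.not_eq_true, PySem.Dict.contains_iff_mem_keys, hkeys, PySem.Set.update_eq_append_filter]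
      intro hmem
      rcases List.mem_append.mp hmem with hm | hm
      · rw [← PySem.Dict.contains_iff_mem_keys] at hm
        rw [hfresh q (List.mem_cons_of_mem _ hq) k hswq] at hm
        exact Bool.false_ne_true hm
      · have hmS : k ∈ PySem.List.sorted (raw.keys.filter (fun k => PySem.Str.startswith k (p ++ "_"))) pvSortKey :=
          by rw [← PySem.Set.mem_ofList]; exact (List.mem_filter.mp hm).1
        have hswp := hmemS k hmS
        have := (List.pairwise_cons.mp hexcl).1 q hq k hswq
        rw [this] at hswp
        exact Bool.false_ne_true hswp
    rw [List.foldl_cons, ih _ hfresh' (List.pairwise_cons.mp hexcl).2, h1]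
    simp

theorem pv_items_empty : (PySem.Dict.empty : PySem.Dict String Int).items = [] := rfl

theorem pv_items_label (v : Int) :
    ((PySem.Dict.empty : PySem.Dict String Int).insert "LABEL" v).items = [("LABEL", v)] := rfl

theorem pv_outer (f : String × List (String × Int) → List (String × Int)) (ad : List (String × List (String × Int))) :
    ((PySem.Dict.ofList ad).items.foldl (fun acc mp => acc.insert mp.1 (f mp)) PySem.Dict.empty).items
    = (PySem.Dict.ofList ad).items.map (fun mp => (mp.1, f mp)) := by
  rw [PySem.Dict.items_foldl_insert_fresh ((PySem.Dict.ofList ad).items) (fun mp => mp.1) f PySem.Dict.empty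
    (by intro a _; exact PySem.Dict.contains_empty _)
    (by simpa [PySem.Dict.keys] using PySem.Dict.nodup_keys_ofList ad)]
  rfl

theorem pv_LABEL_nsw (p : String)
    (hp : p ∈ ["bscp", "bug_involving_statements", "code_coverage", "correctness_reflectability", "incorrectness_verifiability"]) :
    PySem.Str.startswith "LABEL" (p ++ "_") = false := by
  fin_cases hp <;> decide

theorem organize_features_spec : Claim_equal_organize_features := by
  intro ad _hdom _hpre
  unfold Spec_organize_features organize_features organize_features_alt
  dsimp only
  rw [pv_outer]
  apply List.map_congr_left
  intro mp _
  refine Prod.ext rfl ?_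
  -- per-model equality
  have hnk := PySem.Dict.nodup_keys_ofList mp.2
  have hfresh : ∀ p ∈ ["bscp", "bug_involving_statements", "code_coverage", "correctness_reflectability", "incorrectness_verifiability"],
      ∀ k, PySem.Str.startswith k (p ++ "_") = true →
      (match (PySem.Dict.ofList mp.2).get? "LABEL" with
        | some v => PySem.Dict.insert PySem.Dict.empty "LABEL" v
        | none => (PySem.Dict.empty : PySem.Dict String Int)).contains k = false := by
    intro p hp k hsw
    have hkL : k ≠ "LABEL" := by
      intro h; rw [h] at hsw; rw [pv_LABEL_nsw p hp] at hsw; exact Bool.false_ne_true hsw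
    cases (PySem.Dict.ofList mp.2).get? "LABEL" with
    | none => exact PySem.Dict.contains_empty _
    | some v =>
      rw [PySem.Dict.contains_insert, PySem.Dict.contains_empty]
      simp [hkL]
  have hexcl : (["bscp", "bug_involving_statements", "code_coverage", "correctness_reflectability", "incorrectness_verifiability"] : List String).Pairwise
      (fun p q => ∀ k, PySem.Str.startswith k (q ++ "_") = true → PySem.Str.startswith k (p ++ "_") = false) := by
    refine List.Pairwise.cons ?_ (List.Pairwise.cons ?_ (List.Pairwise.cons ?_
      (List.Pairwise.cons ?_ (List.Pairwise.cons ?_ List.Pairwise.nil)))) <;>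
    · intro q hq k hk
      fin_cases hq <;> exact pv_sw_excl _ _ _ (by decide) (by decide) hk
  rw [pv_foldA (PySem.Dict.ofList mp.2) _ _ hnk hfresh hexcl]
  rw [pv_buckets]
  cases hL : (PySem.Dict.ofList mp.2).get? "LABEL" with
  | none => simp [pv_items_empty]
  | some v => simp [pv_items_label]

-- ===== VERDICT (by name: the statement is the Claim_ definition above) =====
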